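-- pv_equiv track=rewrite | github.com/MikeRomaa/Google-Foobar | Level 4/bringing-a-gun-to-a-guard-fight/solution.py | getMirrors
-- ===== SOURCE A (Python) =====
-- import math
--
-- def getMirrors(position, distance, dimensions):
--     coords = []
--     originX, originY = position
--     xCoords, yCoords = [originX], [originY]
--     expandX, expandY = int(math.ceil(distance / dimensions[0])), int(math.ceil(distance / dimensions[1]))     # Calculate amount to expand grid by in positive X and Y directions
--
--     for x in range(1, expandX + 2):                                                                           # Get all possible X coordinates
--         originX = -originX + 2 * (dimensions[0] * x)
--         xCoords += [originX]
--     for y in range(1, expandY + 2):                                                                           # Get all possible Y coordinates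
--         originY = -originY + 2 * (dimensions[1] * y)
--         yCoords += [originY]
--     for x in xCoords:                                                                                         # Generate intersections of the positions for all four quadrants
--         for y in yCoords:
--             coords += [[x,y], [-x,y], [x,-y], [-x,-y]]
--
--     return coords
-- ===== SOURCE B (Python) =====
-- import math
--
-- def getMirrors(position, distance, dimensions):
--     originX, originY = position
--     expandX = int(math.ceil(distance / dimensions[0]))
--     expandY = int(math.ceil(distance / dimensions[1]))
--     # closed form for the reflection recurrence: index k maps to (-1)**k * origin + dim * (k + k % 2)
--     xCoords = [originX] + [(-1) ** k * originX + dimensions[0] * (k + k % 2) for k in range(1, expandX + 2)]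
--     yCoords = [originY] + [(-1) ** k * originY + dimensions[1] * (k + k % 2) for k in range(1, expandY + 2)]
--     return [p for x in xCoords for y in yCoords
--               for p in ([x, y], [-x, y], [x, -y], [-x, -y])]
-- ===== Notes on version B (the rewrite author's own statement) =====
-- stated objective: simpler
-- what changed: Each reflected coordinate is computed directly by the closed form (-1)**k*origin + dim*(k + k%2) instead of A's sequential reflection recurrence, and the quadrant product is emitted by one flat comprehension instead of an accumulator double loop.
import Mathlib
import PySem

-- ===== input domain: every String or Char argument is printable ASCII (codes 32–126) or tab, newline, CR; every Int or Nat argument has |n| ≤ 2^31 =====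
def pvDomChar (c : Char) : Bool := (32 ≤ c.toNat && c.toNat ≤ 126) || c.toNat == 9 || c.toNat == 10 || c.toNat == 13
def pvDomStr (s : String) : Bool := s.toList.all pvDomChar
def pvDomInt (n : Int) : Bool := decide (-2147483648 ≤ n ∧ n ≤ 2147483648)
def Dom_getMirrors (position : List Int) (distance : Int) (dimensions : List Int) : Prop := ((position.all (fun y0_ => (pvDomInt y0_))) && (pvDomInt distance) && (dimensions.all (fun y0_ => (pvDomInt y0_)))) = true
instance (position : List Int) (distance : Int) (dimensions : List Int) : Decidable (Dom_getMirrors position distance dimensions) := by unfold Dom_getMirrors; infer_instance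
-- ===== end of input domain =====

-- B replaces A's two reflection recurrence loops by a closed-form coordinate formula and the
-- accumulator product loop by a flat comprehension (objective: simpler; same output, same cost).

-- ===== PORT A =====
-- int(math.ceil(distance / dim)): exact on the stated |int| ≤ 2^31 domain (the float quotient
-- there is too precise to misround across an integer), ported as exact ceiling division.
def pvCeil (a b : Int) : Int := -(PySem.Int.floordiv (-a) b)

def getMirrors (position : List Int) (distance : Int) (dimensions : List Int) : List (List Int) :=
  let originX := PySem.List.pyGetD position 0 0
  let originY := PySem.List.pyGetD position 1 0
  let d0 := PySem.List.pyGetD dimensions 0 0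
  let d1 := PySem.List.pyGetD dimensions 1 0
  let expandX := pvCeil distance d0
  let expandY := pvCeil distance d1
  let stX := (PySem.List.pyRange 1 (expandX + 2) 1).foldl
      (fun (st : List Int × Int) x => let o := -st.2 + 2 * (d0 * x); (st.1 ++ [o], o))
      ([originX], originX)
  let stY := (PySem.List.pyRange 1 (expandY + 2) 1).foldl
      (fun (st : List Int × Int) y => let o := -st.2 + 2 * (d1 * y); (st.1 ++ [o], o))
      ([originY], originY)
  stX.1.foldl (fun acc x =>
    stY.1.foldl (fun acc y => acc ++ [[x, y], [-x, y], [x, -y], [-x, -y]]) acc) []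

-- ===== PORT B =====
def getMirrors_alt (position : List Int) (distance : Int) (dimensions : List Int) : List (List Int) :=
  let originX := PySem.List.pyGetD position 0 0
  let originY := PySem.List.pyGetD position 1 0
  let d0 := PySem.List.pyGetD dimensions 0 0
  let d1 := PySem.List.pyGetD dimensions 1 0
  let expandX := pvCeil distance d0
  let expandY := pvCeil distance d1
  let xCoords := originX ::
    (PySem.List.pyRange 1 (expandX + 2) 1).map
      (fun k => (-1) ^ k.toNat * originX + d0 * (k + PySem.Int.mod k 2))
  let yCoords := originY ::
    (PySem.List.pyRange 1 (expandY + 2) 1).map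
      (fun k => (-1) ^ k.toNat * originY + d1 * (k + PySem.Int.mod k 2))
  xCoords.flatMap (fun x => yCoords.flatMap (fun y => [[x, y], [-x, y], [x, -y], [-x, -y]]))

-- ===== PRECONDITION & SPEC =====
-- Pre_ excludes exactly the inputs where the Python A raises: position not of length 2
-- (unpacking ValueError) or dimensions shorter than 2 (IndexError) or a zero dimension
-- (ZeroDivisionError).
def Pre_getMirrors (position : List Int) (distance : Int) (dimensions : List Int) : Prop :=
  position.length = 2 ∧ 2 ≤ dimensions.length ∧
  dimensions.getD 0 0 ≠ 0 ∧ dimensions.getD 1 0 ≠ 0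

instance (position : List Int) (distance : Int) (dimensions : List Int) : Decidable (Pre_getMirrors position distance dimensions) := by unfold Pre_getMirrors; infer_instance

def pvWitness_getMirrors : List Int × Int × List Int := ([2, 3], 5, [4, 5])

def Spec_getMirrors (position : List Int) (distance : Int) (dimensions : List Int) (out : List (List Int)) : Prop := out = getMirrors_alt position distance dimensions
instance (position : List Int) (distance : Int) (dimensions : List Int) (out : List (List Int)) : Decidable (Spec_getMirrors position distance dimensions out) := by unfold Spec_getMirrors; infer_instance

-- ===== CLAIM (what is proved, stated in full; the proofs are below) =====
def Claim_equal_getMirrors : Prop := ∀ (position : List Int) (distance : Int) (dimensions : List Int), Dom_getMirrors position distance dimensions → Pre_getMirrors position distance dimensions → Spec_getMirrors position distance dimensions (getMirrors position distance dimensions)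

-- ===== LEMMAS AND PROOFS =====

-- the closed form satisfies the loop's recurrence
theorem pvClosed_step (o d x : Int) (hx : 1 ≤ x) :
    (-1) ^ x.toNat * o + d * (x + PySem.Int.mod x 2)
      = -((-1) ^ (x - 1).toNat * o + d * ((x - 1) + PySem.Int.mod (x - 1) 2)) + 2 * (d * x) := by
  have h1 : x.toNat = (x - 1).toNat + 1 := by omega
  rw [h1, pow_succ]
  rw [PySem.Int.mod_eq_emod_of_pos (a := x) (by norm_num : (0:Int) < 2),
      PySem.Int.mod_eq_emod_of_pos (a := x - 1) (by norm_num : (0:Int) < 2)]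
  have h2 : (x - 1) % 2 = 1 - x % 2 := by omega
  rw [h2]; ring

-- the recurrence fold over pyRange a (a+n) 1 appends the closed-form values
theorem pvFold_closed (d : Int) (f : Int → Int)
    (hf : ∀ x : Int, 1 ≤ x → f x = -f (x - 1) + 2 * (d * x)) :
    ∀ (n : ℕ) (a : Int) (acc : List Int), 1 ≤ a →
      (PySem.List.pyRange a (a + n) 1).foldl
          (fun (st : List Int × Int) x => let o := -st.2 + 2 * (d * x); (st.1 ++ [o], o))
          (acc, f (a - 1))
        = (acc ++ (PySem.List.pyRange a (a + n) 1).map f, f (a + n - 1)) := by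
  intro n
  induction n with
  | zero => intro a acc _; simp [PySem.List.pyRange_one_eq_nil (show (a : Int) + (0:ℕ) ≤ a by omega)]
  | succ m ih =>
    intro a acc ha
    rw [PySem.List.pyRange_one_cons (by omega : a < a + (m + 1 : ℕ))]
    simp only [List.foldl_cons, List.map_cons]
    have hstep : -f (a - 1) + 2 * (d * a) = f a := (hf a ha).symm
    have harg : (a : Int) + (m + 1 : ℕ) = (a + 1) + (m : ℕ) := by push_cast; ring
    rw [hstep, harg]
    have h := ih (a + 1) (acc ++ [f a]) (by omega)
    rw [show (a : Int) + 1 - 1 = a from by ring] at h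
    rw [h]
    simp

-- fold of the reflection loop, specialised to range(1, b)
theorem pvLoop_eq (d o b : Int) :
    ((PySem.List.pyRange 1 b 1).foldl
        (fun (st : List Int × Int) x => let o' := -st.2 + 2 * (d * x); (st.1 ++ [o'], o'))
        ([o], o)).1
      = o :: (PySem.List.pyRange 1 b 1).map
          (fun k => (-1) ^ k.toNat * o + d * (k + PySem.Int.mod k 2)) := by
  by_cases hb : b ≤ 1
  · simp [PySem.List.pyRange_one_eq_nil hb]
  · have hb' : (1 : Int) + ((b - 1).toNat : Int) = b := by omega
    have h0 : (fun k : Int => (-1) ^ k.toNat * o + d * (k + PySem.Int.mod k 2)) ((1 : Int) - 1) = o := by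
      norm_num [PySem.Int.mod]
    have h := pvFold_closed d
      (fun k : Int => (-1) ^ k.toNat * o + d * (k + PySem.Int.mod k 2))
      (fun x hx => pvClosed_step o d x hx) (b - 1).toNat 1 [o] le_rfl
    rw [hb', h0] at h
    rw [h]
    rfl

-- the accumulator double loop is the flat product comprehension
theorem pvProd (xs ys : List Int) :
    xs.foldl (fun acc x =>
        ys.foldl (fun acc y => acc ++ [[x, y], [-x, y], [x, -y], [-x, -y]]) acc) []
      = xs.flatMap (fun x => ys.flatMap (fun y => [[x, y], [-x, y], [x, -y], [-x, -y]])) := by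
  have hin : ∀ (x : Int) (acc : List (List Int)),
      ys.foldl (fun acc y => acc ++ [[x, y], [-x, y], [x, -y], [-x, -y]]) acc
        = acc ++ ys.flatMap (fun y => [[x, y], [-x, y], [x, -y], [-x, -y]]) :=
    fun x acc => PySem.List.foldl_append_eq_flatMap _ _ _
  simp only [hin]
  exact (PySem.List.foldl_append_eq_flatMap _ _ _).trans (by simp)

-- ===== VERDICT (by name: the statement is the Claim_ definition above) =====
theorem getMirrors_spec : Claim_equal_getMirrors := by
  intro position distance dimensions _ _
  unfold Spec_getMirrors getMirrors getMirrors_alt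
  simp only [pvLoop_eq, pvProd]
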